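-- pv_equiv track=rewrite | github.com/RoushAH/AdventOfCode2023 | AoC14.py | grid_score
-- ===== SOURCE A (Python) =====
-- ROLLER = "O"
--
-- def find_rollers(column):
--     rollers = []
--     for pos, char in enumerate(column):
--         if char == ROLLER:
--             rollers.append(pos)
--     return rollers
--
-- def grid_score(box_plot):
--     max_score = len(box_plot[0])
--     score = 0
--     for this_row in box_plot:
--         these_rollers = find_rollers(this_row)
--         score += max_score * len(these_rollers)
--         score -= sum(these_rollers)
--     return score
-- ===== SOURCE B (Python) =====
-- ROLLER = "O"
--
-- def grid_score(box_plot):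
--     max_score = len(box_plot[0])
--     score = 0
--     for row in box_plot:
--         w = max_score - len(row)
--         for ch in reversed(row):
--             w += 1
--             if ch == ROLLER:
--                 score += w
--     return score
-- ===== Notes on version B (the rewrite author's own statement) =====
-- stated objective: simpler
-- what changed: B drops the find_rollers helper and the per-row list of roller positions (with its len/sum arithmetic), scoring each row in one right-to-left pass with a running weight that increments per character.
import Mathlib
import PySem

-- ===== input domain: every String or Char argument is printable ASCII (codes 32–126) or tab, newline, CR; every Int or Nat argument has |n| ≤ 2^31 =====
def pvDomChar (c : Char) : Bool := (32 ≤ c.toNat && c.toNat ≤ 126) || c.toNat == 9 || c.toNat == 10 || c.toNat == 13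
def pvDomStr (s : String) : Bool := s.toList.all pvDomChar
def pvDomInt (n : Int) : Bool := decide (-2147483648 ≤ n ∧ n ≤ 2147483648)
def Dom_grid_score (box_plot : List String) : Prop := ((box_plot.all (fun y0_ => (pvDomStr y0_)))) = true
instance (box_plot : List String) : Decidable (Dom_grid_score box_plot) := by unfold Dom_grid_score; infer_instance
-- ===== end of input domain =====

-- B replaces A's per-row list of roller positions (with len/sum arithmetic) by a single
-- right-to-left pass keeping a running weight; objective: simpler, same O(total chars) cost.

-- ===== PORT A =====
-- helper find_rollers: positions of 'O' collected by appending while enumerating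
def find_rollers (column : String) : List Int :=
  (PySem.List.enumerate column.toList).foldl
    (fun rollers pc => if pc.2 = 'O' then rollers ++ [pc.1] else rollers) []

def grid_score (box_plot : List String) : Int :=
  match PySem.List.pyGet? box_plot 0 with
  | none => 0   -- box_plot[0] raises IndexError on []; excluded by Pre_grid_score
  | some r0 =>
    let max_score : Int := PySem.Str.len r0
    box_plot.foldl
      (fun score this_row =>
        let these_rollers := find_rollers this_row
        score + max_score * (these_rollers.length : Int) - these_rollers.sum) 0

-- ===== PORT B =====
def grid_score_alt (box_plot : List String) : Int :=
  match PySem.List.pyGet? box_plot 0 with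
  | none => 0   -- box_plot[0] raises IndexError on []; excluded by Pre_grid_score
  | some r0 =>
    let max_score : Int := PySem.Str.len r0
    box_plot.foldl
      (fun score row =>
        (row.toList.reverse.foldl
          (fun (st : Int × Int) ch =>
            let w := st.1 + 1
            (w, if ch = 'O' then st.2 + w else st.2))
          (max_score - PySem.Str.len row, score)).2) 0

-- ===== PRECONDITION & SPEC =====
-- Pre_ excludes only the empty grid, on which both Pythons raise IndexError at box_plot[0].
def Pre_grid_score (box_plot : List String) : Prop := box_plot ≠ []
instance (box_plot : List String) : Decidable (Pre_grid_score box_plot) := by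
  unfold Pre_grid_score; infer_instance

def pvWitness_grid_score : List String := ["O.O", ".O"]

def Spec_grid_score (box_plot : List String) (out : Int) : Prop := out = grid_score_alt box_plot
instance (box_plot : List String) (out : Int) : Decidable (Spec_grid_score box_plot out) := by
  unfold Spec_grid_score; infer_instance

-- ===== CLAIM (what is proved, stated in full; the proofs are below) =====
def Claim_equal_grid_score : Prop := ∀ (box_plot : List String), Dom_grid_score box_plot → Pre_grid_score box_plot → Spec_grid_score box_plot (grid_score box_plot)

-- ===== LEMMAS AND PROOFS =====

-- reference row score: weight of the first char is w0 + length, decreasing to w0 + 1 at the end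
def rowSpec : List Char → Int → Int
  | [], _ => 0
  | c :: rest, w => (if c = 'O' then w + (rest.length : Int) + 1 else 0) + rowSpec rest w

-- positions of 'O' starting at index s
def posList : List Char → Int → List Int
  | [], _ => []
  | c :: rest, s => (if c = 'O' then [s] else []) ++ posList rest (s + 1)

theorem find_rollers_fold (l : List Char) (s : Int) (acc : List Int) :
    (PySem.List.enumerate l s).foldl
      (fun rollers pc => if pc.2 = 'O' then rollers ++ [pc.1] else rollers) acc
    = acc ++ posList l s := by
  induction l generalizing s acc with
  | nil => simp [posList, PySem.List.enumerate_nil]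
  | cons c rest ih =>
    simp only [PySem.List.enumerate_cons, List.foldl_cons, posList]
    by_cases h : c = 'O' <;> simp [h, ih]

theorem posList_val (l : List Char) (m s : Int) :
    m * ((posList l s).length : Int) - (posList l s).sum
      = rowSpec l (m - s - (l.length : Int)) := by
  induction l generalizing s with
  | nil => simp [posList, rowSpec]
  | cons c rest ih =>
    have hih := ih (s + 1)
    have harg : m - (s + 1) - (rest.length : Int) = m - s - ((rest.length : Int) + 1) := by ring
    rw [harg] at hih
    by_cases h : c = 'O' <;>
      simp only [posList, rowSpec, h, if_true, if_false, List.nil_append,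
        List.singleton_append, List.length_cons, List.sum_cons] <;>
      push_cast [List.length_cons] at hih ⊢ <;> linarith [hih]

theorem rowB_fold (l : List Char) (w0 t : Int) :
    l.reverse.foldl
      (fun (st : Int × Int) ch =>
        let w := st.1 + 1
        (w, if ch = 'O' then st.2 + w else st.2)) (w0, t)
    = (w0 + (l.length : Int), t + rowSpec l w0) := by
  induction l generalizing t with
  | nil => simp [rowSpec]
  | cons c rest ih =>
    simp only [List.reverse_cons, List.foldl_append, ih, List.foldl_cons, List.foldl_nil,
      rowSpec, List.length_cons]
    by_cases h : c = 'O' <;> simp only [h, if_true, if_false] <;>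
      refine Prod.ext ?_ ?_ <;> push_cast <;> linarith

theorem rows_eq (rows : List String) (m score : Int) :
    rows.foldl
      (fun score this_row =>
        let these_rollers := find_rollers this_row
        score + m * (these_rollers.length : Int) - these_rollers.sum) score
    = rows.foldl
      (fun score row =>
        (row.toList.reverse.foldl
          (fun (st : Int × Int) ch =>
            let w := st.1 + 1
            (w, if ch = 'O' then st.2 + w else st.2))
          (m - PySem.Str.len row, score)).2) score := by
  induction rows generalizing score with
  | nil => rfl
  | cons r rest ih =>
    simp only [List.foldl_cons]
    rw [ih]
    congr 1
    rw [rowB_fold]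
    have hA : find_rollers r = posList r.toList 0 := by
      simpa using find_rollers_fold r.toList 0 []
    have hv := posList_val r.toList m 0
    rw [sub_zero] at hv
    simp only [hA, PySem.Str.len_eq]
    linarith [hv]

-- ===== VERDICT (by name: the statement is the Claim_ definition above) =====
theorem grid_score_spec : Claim_equal_grid_score := by
  intro box_plot _ hpre
  unfold Spec_grid_score grid_score grid_score_alt
  cases box_plot with
  | nil => exact absurd rfl hpre
  | cons r0 rest =>
    simp only [PySem.List.pyGet?_zero_cons]
    exact rows_eq (r0 :: rest) (PySem.Str.len r0) 0
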